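-- pv_equiv track=rewrite | github.com/natelgrw/titan_foundation_model | netlists/clean_gana.py | remove_comments_and_params
-- ===== SOURCE A (Python) =====
-- def remove_comments_and_params(source_file_list):
--     """
--     Removes lines starting with `*` or containing ".PARAMS" from the source file list.
--
--     Args:
--         source_file_list (list): List of lines from the input file.
--
--     Returns:
--         list: Filtered list of lines without comments or ".PARAM".
--     """
--     cleaned_list = []
--     for line in source_file_list:
--         if line.startswith("*") and "*.PININFO" not in line:
--             continue
--         elif ".PARAM" in line:
--             continue
--         elif "+    " in line:
--             continue
--         cleaned_list.append(line.strip())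
--
--     filtered_list = []
--     for line in cleaned_list:
--         if line or (filtered_list and filtered_list[-1]):
--             filtered_list.append(line)
--
--     return filtered_list
-- ===== SOURCE B (Python) =====
-- def remove_comments_and_params(source_file_list):
--     """Single fused pass: filter comment/param lines and collapse blank runs."""
--     result = []
--     last = ""
--     for line in source_file_list:
--         if line.startswith("*") and "*.PININFO" not in line:
--             continue
--         if ".PARAM" in line:
--             continue
--         if "+    " in line:
--             continue
--         stripped = line.strip()
--         if stripped or last:
--             result.append(stripped)
--             last = stripped
--     return result
-- ===== Notes on version B (the rewrite author's own statement) =====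
-- stated objective: simpler
-- what changed: B fuses A's two sequential passes (filter/strip into an intermediate cleaned_list, then a second pass collapsing blank runs via filtered_list[-1]) into one pass that tracks the last appended line in a scalar variable, eliminating the intermediate list.
import Mathlib
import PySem

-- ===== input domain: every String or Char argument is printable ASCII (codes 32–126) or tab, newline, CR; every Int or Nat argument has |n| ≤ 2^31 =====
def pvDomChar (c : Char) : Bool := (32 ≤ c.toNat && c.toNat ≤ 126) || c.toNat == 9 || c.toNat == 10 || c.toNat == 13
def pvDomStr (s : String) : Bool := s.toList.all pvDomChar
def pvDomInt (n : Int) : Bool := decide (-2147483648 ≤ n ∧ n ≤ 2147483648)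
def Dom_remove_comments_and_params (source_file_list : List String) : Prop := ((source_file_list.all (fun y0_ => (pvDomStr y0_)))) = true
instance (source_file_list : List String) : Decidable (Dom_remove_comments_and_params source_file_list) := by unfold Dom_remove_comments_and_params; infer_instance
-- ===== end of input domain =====

-- B fuses A's two passes (filter, then collapse blank runs) into one pass that
-- tracks the last appended line; objective: simpler (one traversal, no intermediate list).

-- ===== PORT A =====
-- first loop body: build cleaned_list
def pvCleanStep (acc : List String) (line : String) : List String :=
  if PySem.Str.startswith line "*" && !(PySem.Str.isIn "*.PININFO" line) then acc
  else if PySem.Str.isIn ".PARAM" line then acc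
  else if PySem.Str.isIn "+    " line then acc
  else acc ++ [PySem.Str.strip line]

-- second loop body: `if line or (filtered_list and filtered_list[-1])`
def pvFilterStep (acc : List String) (line : String) : List String :=
  if line ≠ "" ∨ (acc ≠ [] ∧ acc.getLastD "" ≠ "") then acc ++ [line] else acc

def remove_comments_and_params (source_file_list : List String) : List String :=
  (source_file_list.foldl pvCleanStep []).foldl pvFilterStep []

-- ===== PORT B =====
-- fused loop body: state = (result, last appended line)
def pvFusedStep (st : List String × String) (line : String) : List String × String :=
  if PySem.Str.startswith line "*" && !(PySem.Str.isIn "*.PININFO" line) then st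
  else if PySem.Str.isIn ".PARAM" line then st
  else if PySem.Str.isIn "+    " line then st
  else
    let s := PySem.Str.strip line
    if s ≠ "" ∨ st.2 ≠ "" then (st.1 ++ [s], s) else st

def remove_comments_and_params_alt (source_file_list : List String) : List String :=
  (source_file_list.foldl pvFusedStep ([], "")).1

-- ===== PRECONDITION & SPEC =====
def Spec_remove_comments_and_params (source_file_list : List String) (out : List String) : Prop := out = remove_comments_and_params_alt source_file_list
instance (source_file_list : List String) (out : List String) : Decidable (Spec_remove_comments_and_params source_file_list out) := by unfold Spec_remove_comments_and_params; infer_instance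

-- ===== CLAIM (what is proved, stated in full; the proofs are below) =====
def Claim_equal_remove_comments_and_params : Prop := ∀ (source_file_list : List String), Dom_remove_comments_and_params source_file_list → Spec_remove_comments_and_params source_file_list (remove_comments_and_params source_file_list)

-- ===== LEMMAS AND PROOFS =====

-- pvCleanStep appends at most one element, so its fold factors through the accumulator
lemma pvCleanStep_factor (xs : List String) (acc : List String) :
    xs.foldl pvCleanStep acc = acc ++ xs.foldl pvCleanStep [] := by
  induction xs generalizing acc with
  | nil => simp
  | cons l t ih =>
    simp only [List.foldl_cons]
    rw [ih (pvCleanStep acc l), ih (pvCleanStep [] l)]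
    unfold pvCleanStep
    split_ifs <;> simp

-- the fused fold, started with last = acc.getLastD "", computes A's second pass
-- applied (from accumulator acc) to A's first pass
lemma pvFused_key (xs : List String) (acc : List String) :
    (xs.foldl pvFusedStep (acc, acc.getLastD "")).1
      = (xs.foldl pvCleanStep []).foldl pvFilterStep acc := by
  induction xs generalizing acc with
  | nil => simp
  | cons l t ih =>
    simp only [List.foldl_cons]
    by_cases h1 : (PySem.Str.startswith l "*" && !(PySem.Str.isIn "*.PININFO" l)) = true
    · rw [show pvFusedStep (acc, acc.getLastD "") l = (acc, acc.getLastD "") from by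
            unfold pvFusedStep; rw [if_pos h1],
          show pvCleanStep [] l = [] from by unfold pvCleanStep; rw [if_pos h1]]
      exact ih acc
    · by_cases h2 : PySem.Str.isIn ".PARAM" l = true
      · rw [show pvFusedStep (acc, acc.getLastD "") l = (acc, acc.getLastD "") from by
              unfold pvFusedStep; rw [if_neg h1, if_pos h2],
            show pvCleanStep [] l = [] from by unfold pvCleanStep; rw [if_neg h1, if_pos h2]]
        exact ih acc
      · by_cases h3 : PySem.Str.isIn "+    " l = true
        · rw [show pvFusedStep (acc, acc.getLastD "") l = (acc, acc.getLastD "") from by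
                unfold pvFusedStep; rw [if_neg h1, if_neg h2, if_pos h3],
              show pvCleanStep [] l = [] from by
                unfold pvCleanStep; rw [if_neg h1, if_neg h2, if_pos h3]]
          exact ih acc
        · -- the line is kept; s is its stripped form
          have hclean : pvCleanStep [] l = [PySem.Str.strip l] := by
            unfold pvCleanStep; rw [if_neg h1, if_neg h2, if_neg h3]; rfl
          rw [hclean, pvCleanStep_factor t, List.foldl_append]
          simp only [List.foldl_cons, List.foldl_nil]
          set s := PySem.Str.strip l with hs
          by_cases hc : s ≠ "" ∨ acc.getLastD "" ≠ ""
          · have hfc : s ≠ "" ∨ (acc ≠ [] ∧ acc.getLastD "" ≠ "") := by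
              rcases hc with h | h
              · exact Or.inl h
              · exact Or.inr ⟨fun hnil => by simp [hnil] at h, h⟩
            rw [show pvFusedStep (acc, acc.getLastD "") l = (acc ++ [s], s) from by
                  unfold pvFusedStep; rw [if_neg h1, if_neg h2, if_neg h3]
                  exact if_pos hc,
                show pvFilterStep acc s = acc ++ [s] from by
                  unfold pvFilterStep; exact if_pos hfc]
            have := ih (acc ++ [s])
            simpa using this
          · have hfc : ¬(s ≠ "" ∨ (acc ≠ [] ∧ acc.getLastD "" ≠ "")) := by
              rcases not_or.mp hc with ⟨hse, hle⟩
              exact not_or.mpr ⟨hse, fun ⟨_, h⟩ => hle h⟩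
            rw [show pvFusedStep (acc, acc.getLastD "") l = (acc, acc.getLastD "") from by
                  unfold pvFusedStep; rw [if_neg h1, if_neg h2, if_neg h3]
                  exact if_neg hc,
                show pvFilterStep acc s = acc from by
                  unfold pvFilterStep; exact if_neg hfc]
            exact ih acc

-- ===== VERDICT (by name: the statement is the Claim_ definition above) =====
theorem remove_comments_and_params_spec : Claim_equal_remove_comments_and_params := by
  intro xs _
  show remove_comments_and_params xs = remove_comments_and_params_alt xs
  unfold remove_comments_and_params remove_comments_and_params_alt
  have := pvFused_key xs []
  simpa using this.symm
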